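-- pv_equiv track=rewrite | github.com/sbnikhil/OpenAegis | src/sentinel/guardrails.py | _contains_jailbreak
-- ===== SOURCE A (Python) =====
-- def _contains_jailbreak(text: str) -> bool:
--     jailbreak_patterns = [
--         "DAN",
--         "do anything now",
--         "without any restrictions",
--         "bypass your programming",
--         "ignore safety",
--         "ignore ethics",
--         "hypothetically speaking",
--         "in a fictional world",
--         "for educational purposes",
--         "uncensored mode",
--     ]
--
--     text_lower = text.lower()
--     return any(pattern in text_lower for pattern in jailbreak_patterns)
-- ===== SOURCE B (Python) =====
-- def _contains_jailbreak(text: str) -> bool: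
--     patterns = (
--         "DAN",
--         "do anything now",
--         "without any restrictions",
--         "bypass your programming",
--         "ignore safety",
--         "ignore ethics",
--         "hypothetically speaking",
--         "in a fictional world",
--         "for educational purposes",
--         "uncensored mode",
--     )
--     t = text.lower()
--     # position-major scan: at each offset test whether some pattern starts there
--     return any(t.startswith(p, i) for i in range(len(t) + 1) for p in patterns)
-- ===== Notes on version B (the rewrite author's own statement) =====
-- stated objective: alternative
-- what changed: A runs one full substring search per pattern over the lowered text; B makes a single position-major pass over the text, testing at each offset whether any pattern starts there via startswith(p, i).
import Mathlib
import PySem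

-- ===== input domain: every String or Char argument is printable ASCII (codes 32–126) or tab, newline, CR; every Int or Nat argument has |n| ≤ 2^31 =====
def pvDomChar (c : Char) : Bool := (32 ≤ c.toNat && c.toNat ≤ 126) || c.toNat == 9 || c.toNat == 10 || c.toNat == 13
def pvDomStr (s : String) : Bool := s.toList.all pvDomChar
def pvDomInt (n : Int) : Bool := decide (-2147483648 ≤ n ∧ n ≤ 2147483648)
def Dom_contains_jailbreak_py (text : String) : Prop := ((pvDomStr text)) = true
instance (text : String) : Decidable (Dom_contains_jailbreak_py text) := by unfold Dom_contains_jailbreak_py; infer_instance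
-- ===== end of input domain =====

-- B replaces A's per-pattern substring searches by a single position-major scan
-- with prefix tests at each offset (alternative decomposition, same cost).


-- ===== PORT A =====
def contains_jailbreak_py (text : String) : Bool :=
  let jailbreak_patterns : List String :=
    ["DAN", "do anything now", "without any restrictions", "bypass your programming",
     "ignore safety", "ignore ethics", "hypothetically speaking", "in a fictional world",
     "for educational purposes", "uncensored mode"]
  let text_lower := PySem.Str.lower text
  jailbreak_patterns.any (fun pattern => PySem.Str.isIn pattern text_lower)

-- ===== PORT B =====
-- B's pattern tuple, as a list of char lists (the scan works character-wise).
def jbPatternsC : List (List Char) :=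
  (["DAN", "do anything now", "without any restrictions", "bypass your programming",
    "ignore safety", "ignore ethics", "hypothetically speaking", "in a fictional world",
    "for educational purposes", "uncensored mode"] : List String).map String.toList

def contains_jailbreak_py_alt (text : String) : Bool :=
  let t := (PySem.Str.lower text).toList
  -- Python's t.startswith(p, i) for 0 ≤ i is exactly: p is a prefix of t dropped at i.
  (PySem.List.pyRange 0 ((t.length : Int) + 1) 1).any
    (fun i => jbPatternsC.any (fun p => PySem.Chars.startswith (t.drop i.toNat) p))

-- ===== PRECONDITION & SPEC =====
def Spec_contains_jailbreak_py (text : String) (out : Bool) : Prop := out = contains_jailbreak_py_alt text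
instance (text : String) (out : Bool) : Decidable (Spec_contains_jailbreak_py text out) := by unfold Spec_contains_jailbreak_py; infer_instance

-- ===== CLAIM (what is proved, stated in full; the proofs are below) =====
def Claim_equal_contains_jailbreak_py : Prop := ∀ (text : String), Dom_contains_jailbreak_py text → Spec_contains_jailbreak_py text (contains_jailbreak_py text)

-- ===== LEMMAS AND PROOFS =====

-- The position-major scan of B finds a pattern iff it is a substring (A's test).
lemma alt_scan_eq_isIn (t : List Char) :
    (PySem.List.pyRange 0 ((t.length : Int) + 1) 1).any
      (fun i => jbPatternsC.any (fun p => PySem.Chars.startswith (t.drop i.toNat) p))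
    = jbPatternsC.any (fun p => PySem.Chars.isIn p t) := by
  rw [Bool.eq_iff_iff]
  simp only [List.any_eq_true, PySem.Chars.startswith_iff, PySem.Chars.isIn_iff_infix,
    PySem.List.mem_pyRange_one]
  constructor
  · rintro ⟨i, ⟨hi0, hi1⟩, p, hp, hpre⟩
    exact ⟨p, hp, hpre.isInfix.trans (List.drop_suffix _ t).isInfix⟩
  · rintro ⟨p, hp, hinf⟩
    obtain ⟨j, hj⟩ := (PySem.Chars.exists_prefix_drop_iff_isIn p t).2
      ((PySem.Chars.isIn_iff_infix p t).2 hinf)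
    rcases Nat.lt_or_ge t.length j with hlt | hle
    · have hnil : t.drop j = [] := List.drop_eq_nil_of_le (Nat.le_of_lt hlt)
      have hpnil : p = [] := List.prefix_nil.1 (hnil ▸ hj)
      exact ⟨0, ⟨le_refl _, by omega⟩, p, hp, by simp [hpnil]⟩
    · exact ⟨(j : Int), ⟨by positivity, by omega⟩, p, hp, by simpa using hj⟩

-- ===== VERDICT (by name: the statement is the Claim_ definition above) =====
theorem contains_jailbreak_py_spec : Claim_equal_contains_jailbreak_py := by
  intro text _
  unfold Spec_contains_jailbreak_py contains_jailbreak_py contains_jailbreak_py_alt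
  rw [alt_scan_eq_isIn]
  simp [jbPatternsC, PySem.Str.isIn_eq]
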